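-- pv_equiv track=rewrite | github.com/mlbright/aabudget | aabudget.py | find_results
-- ===== SOURCE A (Python) =====
-- def find_results(items, costs, budget):
--     def backtrack(current_combination, current_cost, idx):
--         if current_cost <= 0:
--             return
--
--         # If the current combination is valid, copy it to the list of results
--         if current_combination:
--             results.append(current_combination[:])
--
--         # Try adding each type of item starting from the current position
--         for i in range(idx, len(items)):
--             item = items[i]
--             cost = costs[i]
--
--             max_number_item = current_cost // cost
--
--             for j in range(1, max_number_item + 1):
--                 current_combination.extend([item] * j)
--                 current_cost -= cost * j
--
--                 # Recurse with the updated combination and cost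
--                 backtrack(current_combination, current_cost, i + 1)
--
--                 # Backtrack: remove the last item added
--                 for _ in range(j):
--                     current_combination.pop()
--                     current_cost += cost
--
--             # current_combination.append(item)
--             # current_cost -= cost
--
--             # # Recurse with the updated combination and cost
--             # backtrack(current_combination, current_cost, idx + 1)
--
--             # # Backtrack: remove the last item added
--             # current_combination.pop()
--             # current_cost += cost
--
--     # store all valid combinations
--     results = []
--
--     # Start the backtracking process
--     backtrack([], budget, 0)
--
--     return results
-- ===== SOURCE B (Python) =====
-- def find_results(items, costs, budget):
--     # Pure skip-or-take recursion over the zipped (item, cost) list; each call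
--     # returns all suffix combinations (headed by the empty one) in A's pre-order.
--     def solve(pairs, remaining):
--         if remaining <= 0:
--             return []
--         if not pairs:
--             return [[]]
--         (item, cost), rest = pairs[0], pairs[1:]
--         out = [[]]
--         for j in range(1, remaining // cost + 1):
--             out.extend([item] * j + tail for tail in solve(rest, remaining - cost * j))
--         out.extend(solve(rest, remaining)[1:])
--         return out
--     return solve(list(zip(items, costs)), budget)[1:]
-- ===== Notes on version B (the rewrite author's own statement) =====
-- stated objective: alternative
-- what changed: A's index-based backtracking that mutates a shared combination/budget and appends to a results list is replaced by a pure skip-or-take recursion over the zipped (item, cost) list in which each call returns the full list of suffix combinations (headed by the empty one) and the answer is that list minus its head.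
import Mathlib
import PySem

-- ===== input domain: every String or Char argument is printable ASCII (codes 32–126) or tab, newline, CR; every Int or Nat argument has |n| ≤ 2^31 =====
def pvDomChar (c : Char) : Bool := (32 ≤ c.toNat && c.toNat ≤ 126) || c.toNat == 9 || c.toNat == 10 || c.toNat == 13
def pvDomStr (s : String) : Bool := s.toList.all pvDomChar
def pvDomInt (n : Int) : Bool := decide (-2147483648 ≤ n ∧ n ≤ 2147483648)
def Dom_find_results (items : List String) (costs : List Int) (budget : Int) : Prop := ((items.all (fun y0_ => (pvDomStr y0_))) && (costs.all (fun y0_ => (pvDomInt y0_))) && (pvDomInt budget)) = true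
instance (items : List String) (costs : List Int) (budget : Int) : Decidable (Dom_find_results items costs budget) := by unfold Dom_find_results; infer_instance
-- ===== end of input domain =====

-- B replaces A's backtracking that mutates a shared combination/budget/results state by a
-- pure skip-or-take recursion returning the combination lists (objective: alternative).

-- ===== PORT A =====
-- A's backtrack with the mutable `results` threaded as `res`. Its index loop
-- `for i in range(idx, len(items))` walks the suffix of zipped (item, cost) pairs
-- (inside Pre_, items.length ≤ costs.length, so zipping loses nothing A reads);
-- `btGo` is the body of backtrack (early return, emit, delegate to the i-loop) and
-- `loopJA` its j-loop, with `child` = backtrack(·, ·, i+1).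
def loopJA (item : String) (c : Int)
    (child : List String → Int → List (List String) → List (List String)) :
    Nat → Int → List String → Int → List (List String) → List (List String)
  | 0, _, _, _, res => res
  | Nat.succ cnt', j, cur, cost, res =>
    loopJA item c child cnt' (j+1) cur cost
      (child (cur ++ List.replicate j.toNat item) (cost - c * j) res)

def btGo (loopRest : List String → Int → List (List String) → List (List String))
    (cur : List String) (cost : Int) (res : List (List String)) : List (List String) :=
  if cost ≤ 0 then res
  else loopRest cur cost (if cur.isEmpty then res else res ++ [cur])

def loopIA : List (String × Int) → List String → Int → List (List String) → List (List String)
  | [], _, _, res => res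
  | (item, c) :: rest, cur, cost, res =>
    let res1 := loopJA item c (btGo (loopIA rest)) ((PySem.Int.floordiv cost c).toNat) 1 cur cost res
    loopIA rest cur cost res1

def find_results (items : List String) (costs : List Int) (budget : Int) : List (List String) :=
  btGo (loopIA (items.zip costs)) [] budget []

-- ===== PORT B =====
-- B's `solve(pairs, remaining)`, with its j-loop as `jloopB` (counted down by `cnt`,
-- `solveRest` = solve of the tail).
def jloopB (item : String) (c : Int) (solveRest : Int → List (List String)) (r : Int) :
    Nat → Int → List (List String) → List (List String)
  | 0, _, out => out
  | Nat.succ cnt', j, out =>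
    jloopB item c solveRest r cnt' (j+1)
      (out ++ (solveRest (r - c * j)).map (fun tail => List.replicate j.toNat item ++ tail))

def solveB : List (String × Int) → Int → List (List String)
  | pairs, r =>
    if r ≤ 0 then []
    else
      match pairs with
      | [] => [[]]
      | (item, c) :: rest =>
        jloopB item c (fun rr => solveB rest rr) r ((PySem.Int.floordiv r c).toNat) 1 [[]]
          ++ (solveB rest r).tail

def find_results_alt (items : List String) (costs : List Int) (budget : Int) : List (List String) :=
  (solveB (items.zip costs) budget).tail

-- ===== PRECONDITION & SPEC =====
-- Pre_ excludes exactly the inputs on which Python A raises: with budget > 0 the outer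
-- loop visits every item index with remaining = budget, so a missing cost (IndexError)
-- or a zero cost among the first items.length costs (ZeroDivisionError) always raises.
def Pre_find_results (items : List String) (costs : List Int) (budget : Int) : Prop :=
  budget ≤ 0 ∨ (items.length ≤ costs.length ∧ ∀ c ∈ costs.take items.length, c ≠ 0)
instance (items : List String) (costs : List Int) (budget : Int) : Decidable (Pre_find_results items costs budget) := by unfold Pre_find_results; infer_instance

def pvWitness_find_results : List String × List Int × Int := (["a", "b"], [2, 3], 7)

def Spec_find_results (items : List String) (costs : List Int) (budget : Int) (out : List (List String)) : Prop := out = find_results_alt items costs budget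
instance (items : List String) (costs : List Int) (budget : Int) (out : List (List String)) : Decidable (Spec_find_results items costs budget out) := by unfold Spec_find_results; infer_instance

-- ===== CLAIM (what is proved, stated in full; the proofs are below) =====
def Claim_equal_find_results : Prop := ∀ (items : List String) (costs : List Int) (budget : Int), Dom_find_results items costs budget → Pre_find_results items costs budget → Spec_find_results items costs budget (find_results items costs budget)


-- ===== LEMMAS AND PROOFS =====

-- the list B's j-loop appends to `out` (f = solve of the tail)
def jspec (item : String) (c : Int) (f : Int → List (List String)) (r : Int) :
    Nat → Int → List (List String)
  | 0, _ => []
  | Nat.succ cnt', j =>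
    (f (r - c * j)).map (fun t => List.replicate j.toNat item ++ t)
      ++ jspec item c f r cnt' (j+1)

theorem solveB_nonpos (pairs : List (String × Int)) (r : Int) (h : r ≤ 0) : solveB pairs r = [] := by
  rw [solveB.eq_def]; simp [h]

theorem solveB_nil (r : Int) (h : 0 < r) : solveB [] r = [[]] := by
  rw [solveB.eq_def]; simp [show ¬ r ≤ 0 by omega]

theorem jloopB_eq (item : String) (c : Int) (f : Int → List (List String)) (r : Int) :
    ∀ (cnt : Nat) (j : Int) (out : List (List String)),
      jloopB item c f r cnt j out = out ++ jspec item c f r cnt j := by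
  intro cnt
  induction cnt with
  | zero => intro j out; simp [jloopB, jspec]
  | succ k ih => intro j out; simp [jloopB, jspec, ih, List.append_assoc]

theorem solveB_cons (item : String) (c : Int) (rest : List (String × Int)) (r : Int) (h : 0 < r) :
    solveB ((item, c) :: rest) r
      = [] :: (jspec item c (fun rr => solveB rest rr) r ((PySem.Int.floordiv r c).toNat) 1
                ++ (solveB rest r).tail) := by
  rw [solveB.eq_def]; simp [show ¬ r ≤ 0 by omega, jloopB_eq]

theorem solveB_head (pairs : List (String × Int)) (r : Int) (h : 0 < r) :
    solveB pairs r = [] :: (solveB pairs r).tail := by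
  cases pairs with
  | nil => rw [solveB_nil _ h]; rfl
  | cons p rest => obtain ⟨item, c⟩ := p; rw [solveB_cons _ _ _ _ h]; rfl

theorem loopJA_eq (item : String) (c : Int)
    (child : List String → Int → List (List String) → List (List String))
    (f : Int → List (List String))
    (hbt : ∀ cur cost res, cur ≠ [] → child cur cost res
        = res ++ (f cost).map (fun t => cur ++ t)) :
    ∀ (cnt : Nat) (j : Int), 1 ≤ j → ∀ cur cost res,
      loopJA item c child cnt j cur cost res
        = res ++ (jspec item c f cost cnt j).map (fun t => cur ++ t) := by
  intro cnt
  induction cnt with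
  | zero => intro j hj cur cost res; simp [loopJA, jspec]
  | succ k ih =>
    intro j hj cur cost res
    have hne : (cur ++ List.replicate j.toNat item) ≠ [] := by
      simp only [ne_eq, List.append_eq_nil_iff, List.replicate_eq_nil_iff]
      rintro ⟨-, h0⟩; omega
    rw [loopJA, hbt _ _ _ hne, ih (j+1) (by omega)]
    simp [jspec, List.map_append, List.map_map, List.append_assoc, Function.comp]

theorem btGo_of (s : List (String × Int))
    (loopRest : List String → Int → List (List String) → List (List String))
    (hI : ∀ cur cost res, 0 < cost → loopRest cur cost res
        = res ++ ((solveB s cost).tail).map (fun t => cur ++ t)) :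
    ∀ cur cost res, cur ≠ [] → btGo loopRest cur cost res
        = res ++ (solveB s cost).map (fun t => cur ++ t) := by
  intro cur cost res hcur
  rw [btGo]
  by_cases hc : cost ≤ 0
  · simp [hc, solveB_nonpos _ _ hc]
  · have hc' : 0 < cost := by omega
    have hem : cur.isEmpty = false := by cases cur <;> simp_all
    simp only [if_neg hc, hem, Bool.false_eq_true]
    rw [hI _ _ _ hc', solveB_head _ _ hc']
    simp [List.append_assoc]

theorem loopIA_eq : ∀ (s : List (String × Int)) (cur : List String) (cost : Int)
    (res : List (List String)), 0 < cost →
    loopIA s cur cost res = res ++ ((solveB s cost).tail).map (fun t => cur ++ t) := by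
  intro s
  induction s with
  | nil => intro cur cost res hc; simp [loopIA, solveB_nil _ hc]
  | cons p rest ih =>
    obtain ⟨item, c⟩ := p
    intro cur cost res hc
    rw [loopIA]
    have hbt := btGo_of rest (loopIA rest) (fun cur cost res hc => ih cur cost res hc)
    rw [loopJA_eq item c (btGo (loopIA rest)) (fun rr => solveB rest rr) hbt _ 1 (by norm_num)]
    rw [ih _ _ _ hc]
    rw [solveB_cons _ _ _ _ hc]
    simp [List.map_append, List.append_assoc]

-- ===== VERDICT (by name: the statement is the Claim_ definition above) =====
theorem find_results_spec : Claim_equal_find_results := by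
  intro items costs budget _ _
  unfold Spec_find_results find_results find_results_alt btGo
  by_cases hb : budget ≤ 0
  · simp [hb, solveB_nonpos _ _ hb]
  · have hb' : 0 < budget := by omega
    simp only [if_neg hb, List.isEmpty_nil, if_pos]
    rw [loopIA_eq _ _ _ _ hb']
    simp
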